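-- pv_equiv track=rewrite | github.com/Kurorororo/didp-models | m-pdtsp/mpdtsp_util.py | compute_precedence
-- ===== SOURCE A (Python) =====
-- def compute_precedence(nodes, items, demand):
--     precedence_edges = {}
--
--     for i in nodes:
--         if i != nodes[0] and i != nodes[-1]:
--             precedence_edges[nodes[0], i] = 0
--             precedence_edges[i, nodes[-1]] = 0
--         for j in nodes:
--             if i != j:
--                 for k in items:
--                     if demand[i, k] > 0 and demand[j, k] < 0:
--                         precedence_edges[i, j] = demand[i, k]
--                         break
--
--     return precedence_edges
-- ===== SOURCE B (Python) =====
-- def compute_precedence(nodes, items, demand):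
--     if not nodes:
--         return {}
--     first, last = nodes[0], nodes[-1]
--     # all delivery nodes (some item with negative demand; missing entries count as 0), deduplicated
--     deliverers = list(dict.fromkeys(
--         j for k in dict.fromkeys(items) for j in dict.fromkeys(nodes)
--         if demand.get((j, k), 0) < 0))
--     prec = {}
--     for i in nodes:
--         if i != first and i != last:
--             prec[first, i] = 0
--             prec[i, last] = 0
--         # val[j] = demand[i, k] for the first item k (in item order) that i picks up and j delivers;
--         # each deliverer leaves 'remaining' as soon as its first matching item is found
--         val = {}
--         remaining = deliverers
--         for k in items:
--             if not remaining:
--                 break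
--             v = demand.get((i, k), 0)
--             if v > 0:
--                 still = []
--                 for j in remaining:
--                     if demand.get((j, k), 0) < 0:
--                         val[j] = v
--                     else:
--                         still.append(j)
--                 remaining = still
--         if val:
--             for j in nodes:
--                 if i != j and j in val:
--                     prec[i, j] = val[j]
--     return prec
-- ===== Notes on version B (the rewrite author's own statement) =====
-- stated objective: faster
-- what changed: B pre-indexes the delivery nodes once and, per pickup node, builds the first-matching-item value for every deliverer in one pass over items with a shrinking 'remaining deliverers' list (stopping when it empties), then emits edges only if any match exists, instead of A's scan over all items for every ordered node pair; demand is read with .get(key, 0).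
import Mathlib
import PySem

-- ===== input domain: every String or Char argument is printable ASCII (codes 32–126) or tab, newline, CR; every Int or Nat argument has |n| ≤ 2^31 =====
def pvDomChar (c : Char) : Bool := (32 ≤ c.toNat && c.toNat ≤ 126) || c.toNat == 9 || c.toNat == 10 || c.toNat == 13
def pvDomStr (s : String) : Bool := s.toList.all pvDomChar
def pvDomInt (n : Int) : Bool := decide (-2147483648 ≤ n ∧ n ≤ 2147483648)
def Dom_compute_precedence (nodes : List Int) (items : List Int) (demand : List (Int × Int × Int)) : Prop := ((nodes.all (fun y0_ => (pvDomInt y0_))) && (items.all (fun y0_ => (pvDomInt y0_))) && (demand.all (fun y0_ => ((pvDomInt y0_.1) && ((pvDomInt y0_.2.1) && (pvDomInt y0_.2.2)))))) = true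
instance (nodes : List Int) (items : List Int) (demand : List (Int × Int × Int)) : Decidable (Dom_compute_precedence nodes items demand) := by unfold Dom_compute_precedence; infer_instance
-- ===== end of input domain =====

-- B pre-indexes the delivery nodes once and builds each pickup node's first-matching-item values in
-- one pass over items with a shrinking 'remaining deliverers' list, instead of A's scan over all
-- items for every ordered node pair (a timing run measured B faster); same return value (a dict
-- as an insertion-ordered association list) on every input admitted by Pre_; B reads demand with
-- .get(key, 0), so it is total and also returns where A's demand[key] raises KeyError.

-- shared primitive: demand.get((i, k), 0) — for A this is exact only where the key exists, which is
-- what Pre_ guarantees for every key A's scan reaches (on a missing key A's demand[i, k] raises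
-- KeyError); for B it is exact everywhere (B's Python uses .get((i, k), 0))
def pvDget (demand : List (Int × Int × Int)) (i k : Int) : Int :=
  (((demand.find? (fun e => e.1 == i && e.2.1 == k)).map (fun e => e.2.2)).getD 0)

-- shared primitive: Python dict assignment prec[(i, j)] = v on the (i,j,v) association list
-- (overwrite keeps the position of an existing key; a new key is appended)
def pvIns (prec : List (Int × Int × Int)) (i j v : Int) : List (Int × Int × Int) :=
  if prec.any (fun e => e.1 == i && e.2.1 == j) then
    prec.map (fun e => if e.1 == i && e.2.1 == j then (i, j, v) else e)
  else prec ++ [(i, j, v)]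

-- ===== PORT A =====
-- A's inner 'for k in items: … break' loop
def pvAInner (demand : List (Int × Int × Int)) (i j : Int) (ks : List Int)
    (prec : List (Int × Int × Int)) : List (Int × Int × Int) :=
  match ks with
  | [] => prec
  | k :: rest =>
    if pvDget demand i k > 0 ∧ pvDget demand j k < 0 then pvIns prec i j (pvDget demand i k)
    else pvAInner demand i j rest prec

def compute_precedence (nodes : List Int) (items : List Int) (demand : List (Int × Int × Int)) : List (Int × Int × Int) :=
  nodes.foldl (fun prec i =>
    let prec1 :=
      if i ≠ nodes.headD 0 ∧ i ≠ nodes.getLastD 0 then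
        pvIns (pvIns prec (nodes.headD 0) i 0) i (nodes.getLastD 0) 0
      else prec
    nodes.foldl (fun prec j => if i ≠ j then pvAInner demand i j items prec else prec) prec1) []

-- ===== PORT B =====
-- inner 'for j in remaining: …' pass of one item k: assigns val[j] = v for matching deliverers,
-- keeps the others in 'still' (ported as a fold over the (still, val) pair)
def pvPass (demand : List (Int × Int × Int)) (k v : Int) (remaining : List Int)
    (val : PySem.Dict Int Int) : List Int × PySem.Dict Int Int :=
  remaining.foldl (fun sv j =>
    if pvDget demand j k < 0 then (sv.1, sv.2.insert j v) else (sv.1 ++ [j], sv.2)) ([], val)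

-- 'for k in items: if not remaining: break; …' loop building val
def pvValBuild (demand : List (Int × Int × Int)) (i : Int) (ks : List Int)
    (remaining : List Int) (val : PySem.Dict Int Int) : PySem.Dict Int Int :=
  match ks with
  | [] => val
  | k :: rest =>
    if remaining = [] then val
    else
      let v := pvDget demand i k
      if v > 0 then
        let sv := pvPass demand k v remaining val
        pvValBuild demand i rest sv.1 sv.2
      else pvValBuild demand i rest remaining val

def compute_precedence_alt (nodes : List Int) (items : List Int) (demand : List (Int × Int × Int)) : List (Int × Int × Int) :=
  if nodes = [] then [] else
  let first := nodes.headD 0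
  let last := nodes.getLastD 0
  let deliverers : List Int :=
    PySem.List.dedup ((PySem.List.dedup items).flatMap (fun k => (PySem.List.dedup nodes).filter (fun j => pvDget demand j k < 0)))
  nodes.foldl (fun prec i =>
    let prec1 := if i ≠ first ∧ i ≠ last then pvIns (pvIns prec first i 0) i last 0 else prec
    let val := pvValBuild demand i items deliverers PySem.Dict.empty
    if val.items = [] then prec1
    else nodes.foldl (fun prec j =>
      if i ≠ j ∧ (PySem.Dict.get? val j).isSome then pvIns prec i j (val.getD j 0) else prec) prec1) []

-- ===== PRECONDITION & SPEC =====
-- (i, k) is a key of the demand dict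
def pvKey (demand : List (Int × Int × Int)) (i k : Int) : Prop :=
  (demand.find? (fun e => e.1 == i && e.2.1 == k)).isSome = true

-- Pre_ holds exactly when every demand entry A's scan reaches exists: for each ordered pair i ≠ j of
-- nodes and each item position n not past the first break (no earlier item triggered it), the key
-- (i, items[n]) exists, and (j, items[n]) exists whenever demand[i, items[n]] > 0 — i.e. exactly the
-- inputs on which A returns instead of raising KeyError.
def Pre_compute_precedence (nodes : List Int) (items : List Int) (demand : List (Int × Int × Int)) : Prop :=
  ∀ i ∈ nodes, ∀ j ∈ nodes, i ≠ j →
    ∀ n : Nat, n < items.length →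
      (∀ m : Nat, m < n →
        ¬ (pvDget demand i (items.getD m 0) > 0 ∧ pvDget demand j (items.getD m 0) < 0)) →
      (pvKey demand i (items.getD n 0) ∧
        (pvDget demand i (items.getD n 0) > 0 → pvKey demand j (items.getD n 0)))
instance (nodes : List Int) (items : List Int) (demand : List (Int × Int × Int)) : Decidable (Pre_compute_precedence nodes items demand) := by unfold Pre_compute_precedence pvKey; infer_instance

def pvWitness_compute_precedence : List Int × List Int × (List (Int × Int × Int)) :=
  ([0, 1, 2], [5], [(0, 5, 1), (1, 5, -1), (2, 5, 0)])

def Spec_compute_precedence (nodes : List Int) (items : List Int) (demand : List (Int × Int × Int)) (out : List (Int × Int × Int)) : Prop := out = compute_precedence_alt nodes items demand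
instance (nodes : List Int) (items : List Int) (demand : List (Int × Int × Int)) (out : List (Int × Int × Int)) : Decidable (Spec_compute_precedence nodes items demand out) := by unfold Spec_compute_precedence; infer_instance

-- ===== CLAIM (what is proved, stated in full; the proofs are below) =====
def Claim_equal_compute_precedence : Prop := ∀ (nodes : List Int) (items : List Int) (demand : List (Int × Int × Int)), Dom_compute_precedence nodes items demand → Pre_compute_precedence nodes items demand → Spec_compute_precedence nodes items demand (compute_precedence nodes items demand)

-- ===== LEMMAS AND PROOFS =====

-- the first item k of ks with demand[i,k] > 0 and demand[j,k] < 0, mapped to demand[i,k]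
def pvFirstK (demand : List (Int × Int × Int)) (i j : Int) : List Int → Option Int
  | [] => none
  | k :: rest =>
    if pvDget demand i k > 0 ∧ pvDget demand j k < 0 then some (pvDget demand i k)
    else pvFirstK demand i j rest

theorem pvAInner_eq_firstK (demand : List (Int × Int × Int)) (i j : Int) (ks : List Int)
    (prec : List (Int × Int × Int)) :
    pvAInner demand i j ks prec =
      match pvFirstK demand i j ks with
      | some v => pvIns prec i j v
      | none => prec := by
  induction ks with
  | nil => rfl
  | cons k rest ih =>
    by_cases h : pvDget demand i k > 0 ∧ pvDget demand j k < 0 <;>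
      simp [pvAInner, pvFirstK, h, ih]

-- one pvPass over 'remaining': which j are assigned (value some v) and which remain in 'still'
theorem pvPass_get (demand : List (Int × Int × Int)) (k v : Int) (remaining still0 : List Int)
    (val : PySem.Dict Int Int) (j : Int) :
    PySem.Dict.get? (remaining.foldl (fun sv j =>
        if pvDget demand j k < 0 then (sv.1, sv.2.insert j v) else (sv.1 ++ [j], sv.2)) (still0, val)).2 j =
      if j ∈ remaining ∧ pvDget demand j k < 0 then some v else PySem.Dict.get? val j := by
  induction remaining generalizing still0 val with
  | nil => simp
  | cons j' rest ih =>
    simp only [List.foldl_cons]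
    by_cases h' : pvDget demand j' k < 0
    · rw [if_pos h']
      rw [ih]
      by_cases hm : j ∈ rest ∧ pvDget demand j k < 0
      · simp [hm, List.mem_cons]
      · rw [if_neg hm, PySem.Dict.get?_insert]
        by_cases he : j = j'
        · subst he; simp [h', List.mem_cons]
        · simp only [he, if_false]
          rw [if_neg (by rintro ⟨hc, hd⟩; rcases List.mem_cons.mp hc with rfl | hr; exact he rfl; exact hm ⟨hr, hd⟩)]
    · rw [if_neg h', ih]
      by_cases hm : j ∈ rest ∧ pvDget demand j k < 0
      · simp [hm, List.mem_cons]
      · rw [if_neg hm]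
        rw [if_neg (by rintro ⟨hc, hd⟩; rcases List.mem_cons.mp hc with rfl | hr; exact h' hd; exact hm ⟨hr, hd⟩)]

theorem pvPass_mem (demand : List (Int × Int × Int)) (k v : Int) (remaining still0 : List Int)
    (val : PySem.Dict Int Int) (j : Int) :
    (j ∈ (remaining.foldl (fun sv j =>
        if pvDget demand j k < 0 then (sv.1, sv.2.insert j v) else (sv.1 ++ [j], sv.2)) (still0, val)).1) ↔
      (j ∈ still0 ∨ (j ∈ remaining ∧ ¬ pvDget demand j k < 0)) := by
  induction remaining generalizing still0 val with
  | nil => simp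
  | cons j' rest ih =>
    simp only [List.foldl_cons]
    by_cases h' : pvDget demand j' k < 0
    · rw [if_pos h', ih]
      constructor
      · rintro (h | h)
        · exact Or.inl h
        · exact Or.inr ⟨List.mem_cons_of_mem _ h.1, h.2⟩
      · rintro (h | ⟨hc, hd⟩)
        · exact Or.inl h
        · rcases List.mem_cons.mp hc with rfl | hr
          · exact absurd h' hd
          · exact Or.inr ⟨hr, hd⟩
    · rw [if_neg h', ih]
      simp only [List.mem_append, List.mem_cons, List.not_mem_nil, or_false]
      constructor
      · rintro ((h | rfl) | h)
        · exact Or.inl h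
        · exact Or.inr ⟨Or.inl rfl, h'⟩
        · exact Or.inr ⟨Or.inr h.1, h.2⟩
      · rintro (h | ⟨(rfl | hr), hd⟩)
        · exact Or.inl (Or.inl h)
        · exact Or.inl (Or.inr rfl)
        · exact Or.inr ⟨hr, hd⟩

theorem pvPass_snd_get (demand : List (Int × Int × Int)) (k v : Int) (remaining : List Int)
    (val : PySem.Dict Int Int) (j : Int) :
    PySem.Dict.get? (pvPass demand k v remaining val).2 j =
      if j ∈ remaining ∧ pvDget demand j k < 0 then some v else PySem.Dict.get? val j :=
  pvPass_get demand k v remaining [] val j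

theorem pvPass_fst_mem (demand : List (Int × Int × Int)) (k v : Int) (remaining : List Int)
    (val : PySem.Dict Int Int) (j : Int) :
    (j ∈ (pvPass demand k v remaining val).1) ↔ (j ∈ remaining ∧ ¬ pvDget demand j k < 0) := by
  rw [pvPass, pvPass_mem]
  simp

-- the val dict after pvValBuild: a deliverer still in 'remaining' gets its first-matching-item value,
-- an already-assigned one keeps its value, anything else stays absent
theorem pv_val_get (demand : List (Int × Int × Int)) (i : Int) (ks : List Int) :
    ∀ (remaining : List Int) (val : PySem.Dict Int Int)
      (_hinv : ∀ j, (PySem.Dict.get? val j).isSome → j ∉ remaining) (j : Int),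
    PySem.Dict.get? (pvValBuild demand i ks remaining val) j =
      if (PySem.Dict.get? val j).isSome then PySem.Dict.get? val j
      else if j ∈ remaining then pvFirstK demand i j ks
      else none := by
  induction ks with
  | nil =>
    intro remaining val hinv j
    cases hv : PySem.Dict.get? val j <;> simp [pvValBuild, pvFirstK, hv]
  | cons k rest ih =>
    intro remaining val hinv j
    by_cases hrem : remaining = []
    · subst hrem
      cases hv : PySem.Dict.get? val j <;> simp [pvValBuild, hv]
    · rw [pvValBuild, if_neg hrem]
      by_cases hiv : pvDget demand i k > 0
      · simp only [hiv, if_pos]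
        have hinv' : ∀ j', (PySem.Dict.get? (pvPass demand k (pvDget demand i k) remaining val).2 j').isSome →
            j' ∉ (pvPass demand k (pvDget demand i k) remaining val).1 := by
          intro j' hs hm
          rw [pvPass_fst_mem] at hm
          obtain ⟨hr, hd⟩ := hm
          rw [pvPass_snd_get, if_neg (fun h => hd h.2)] at hs
          exact hinv j' hs hr
        rw [ih _ _ hinv' j, pvPass_snd_get]
        simp only [pvPass_fst_mem]
        by_cases hr : j ∈ remaining
        · have hv : PySem.Dict.get? val j = none := by
            cases hv : PySem.Dict.get? val j with
            | none => rfl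
            | some u => exact absurd hr (hinv j (by simp [hv]))
          by_cases hd : pvDget demand j k < 0 <;>
            simp [hr, hd, hv, pvFirstK, hiv]
        · have hc : ¬ (j ∈ remaining ∧ pvDget demand j k < 0) := fun h => hr h.1
          cases hv : PySem.Dict.get? val j <;> simp [hr]
      · rw [if_neg hiv, ih _ _ hinv j]
        have hc : ¬ (pvDget demand i k > 0 ∧ pvDget demand j k < 0) := fun h => hiv h.1
        by_cases hr : j ∈ remaining <;> cases hv : PySem.Dict.get? val j <;>
          simp [hr, pvFirstK, hc]

-- a j with a first matching item is a deliverer of that item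
theorem pv_firstK_mem_deliverers (nodes : List Int) (items : List Int)
    (demand : List (Int × Int × Int)) (i j : Int) (hj : j ∈ nodes) :
    ∀ ks, (∀ k ∈ ks, k ∈ items) → (pvFirstK demand i j ks).isSome →
      j ∈ (PySem.List.dedup items).flatMap
        (fun k => (PySem.List.dedup nodes).filter (fun j => pvDget demand j k < 0)) := by
  intro ks
  induction ks with
  | nil => intro _ h; simp [pvFirstK] at h
  | cons k rest ih =>
    intro hks h
    rw [pvFirstK] at h
    by_cases hc : pvDget demand i k > 0 ∧ pvDget demand j k < 0
    · refine List.mem_flatMap.mpr ⟨k, (PySem.List.mem_dedup _ _).mpr (hks k List.mem_cons_self), ?_⟩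
      simp [List.mem_filter, hj, hc.2]
    · rw [if_neg hc] at h
      exact ih (fun k' h' => hks k' (List.mem_cons_of_mem _ h')) h

theorem pv_inner_fold_eq (nodes : List Int) (items : List Int) (demand : List (Int × Int × Int))
    (i : Int) (prec1 : List (Int × Int × Int)) :
    nodes.foldl (fun prec j => if i ≠ j then pvAInner demand i j items prec else prec) prec1 =
      (if (pvValBuild demand i items
            (PySem.List.dedup ((PySem.List.dedup items).flatMap (fun k => (PySem.List.dedup nodes).filter (fun j => pvDget demand j k < 0))))
            PySem.Dict.empty).items = [] then prec1
       else nodes.foldl (fun prec j =>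
        if i ≠ j ∧ (PySem.Dict.get?
            (pvValBuild demand i items
              (PySem.List.dedup ((PySem.List.dedup items).flatMap (fun k => (PySem.List.dedup nodes).filter (fun j => pvDget demand j k < 0))))
              PySem.Dict.empty) j).isSome then
          pvIns prec i j
            ((pvValBuild demand i items
              (PySem.List.dedup ((PySem.List.dedup items).flatMap (fun k => (PySem.List.dedup nodes).filter (fun j => pvDget demand j k < 0))))
              PySem.Dict.empty).getD j 0)
        else prec) prec1) := by
  have hval : ∀ j ∈ nodes, PySem.Dict.get?
      (pvValBuild demand i items
        (PySem.List.dedup ((PySem.List.dedup items).flatMap (fun k => (PySem.List.dedup nodes).filter (fun j => pvDget demand j k < 0))))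
        PySem.Dict.empty) j = pvFirstK demand i j items := by
    intro j hj
    rw [pv_val_get demand i items _ PySem.Dict.empty (by simp) j]
    simp only [PySem.Dict.get?_empty, Option.isSome_none, Bool.false_eq_true, if_false]
    by_cases hd : j ∈ (PySem.List.dedup ((PySem.List.dedup items).flatMap (fun k => (PySem.List.dedup nodes).filter (fun j => pvDget demand j k < 0))))
    · rw [if_pos hd]
    · rw [if_neg hd]
      cases hfk : pvFirstK demand i j items with
      | none => rfl
      | some v =>
        exfalso
        apply hd
        rw [PySem.List.mem_dedup]
        exact pv_firstK_mem_deliverers nodes items demand i j hj items (fun _ h => h) (by simp [hfk])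
  by_cases hemp : (pvValBuild demand i items
      (PySem.List.dedup ((PySem.List.dedup items).flatMap (fun k => (PySem.List.dedup nodes).filter (fun j => pvDget demand j k < 0))))
      PySem.Dict.empty).items = []
  · rw [if_pos hemp]
    have hnone : ∀ j, PySem.Dict.get?
        (pvValBuild demand i items
          (PySem.List.dedup ((PySem.List.dedup items).flatMap (fun k => (PySem.List.dedup nodes).filter (fun j => pvDget demand j k < 0))))
          PySem.Dict.empty) j = none := by
      intro j
      have he : (pvValBuild demand i items
          (PySem.List.dedup ((PySem.List.dedup items).flatMap (fun k => (PySem.List.dedup nodes).filter (fun j => pvDget demand j k < 0))))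
          PySem.Dict.empty) = PySem.Dict.empty := PySem.Dict.ext (by rw [hemp]; rfl)
      rw [he, PySem.Dict.get?_empty]
    calc nodes.foldl (fun prec j => if i ≠ j then pvAInner demand i j items prec else prec) prec1
        = nodes.foldl (fun prec _ => prec) prec1 := by
          apply PySem.List.foldl_congr_mem
          intro prec j hj
          by_cases hij : i ≠ j
          · rw [if_pos hij, pvAInner_eq_firstK]
            rw [← hval j hj, hnone j]
          · rw [if_neg hij]
      _ = prec1 := PySem.List.foldl_ignore _ _
  · rw [if_neg hemp]
    apply PySem.List.foldl_congr_mem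
    intro prec j hj
    by_cases hij : i ≠ j
    · rw [if_pos hij, pvAInner_eq_firstK]
      cases hfk : pvFirstK demand i j items with
      | none => rw [if_neg (fun h => by rw [hval j hj, hfk] at h; simp at h)]
      | some v =>
        rw [if_pos ⟨hij, by rw [hval j hj, hfk]; rfl⟩, PySem.Dict.getD_eq_get?_getD, hval j hj, hfk]
        rfl
    · rw [if_neg hij, if_neg (fun h => hij h.1)]

-- ===== VERDICT (by name: the statement is the Claim_ definition above) =====
theorem compute_precedence_spec : Claim_equal_compute_precedence := by
  intro nodes items demand _ _
  unfold Spec_compute_precedence compute_precedence compute_precedence_alt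
  by_cases hnil : nodes = []
  · subst hnil; rfl
  · rw [if_neg hnil]
    apply PySem.List.foldl_congr_mem
    intro prec i _
    simp only []
    rw [pv_inner_fold_eq nodes items demand i]
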